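-- pv_equiv track=rewrite | github.com/Amin-Mohamed1/ConnectFourGame | Application/Services/HeuristicCriterias/CouldConnectFourInOneMove.py | __twos_to_fours_horizontal
-- ===== SOURCE A (Python) =====
-- def __twos_to_fours_horizontal(board: list[list[str]], piece: str) -> int:
--     score: int = 0
--     for row in range(len(board)):
--         piece_count: int = 0
--         for col in range(len(board[0])):
--             if board[row][col] == piece:
--                 piece_count += 1
--                 if piece_count >= 2:
--                     if col + 2 < len(board[0]) and board[row][col + 1] == '' and board[row][col + 2] == piece:
--                         score += 1
--                     if col - 3 >= 0 and board[row][col - 2] == '' and board[row][col - 3] == piece: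
--                         score += 1
--             else:
--                 piece_count = 0
--     return score
-- ===== SOURCE B (Python) =====
-- def __twos_to_fours_horizontal(board: list[list[str]], piece: str) -> int:
--     score: int = 0
--     for row in board:
--         for col in range(len(board[0]) - 3):
--             window = (row[col], row[col + 1], row[col + 2], row[col + 3])
--             if window == (piece, piece, '', piece):
--                 score += 1
--             if window == (piece, '', piece, piece):
--                 score += 1
--     return score
-- ===== Notes on version B (the rewrite author's own statement) =====
-- stated objective: simpler
-- what changed: Replaces A's running consecutive-piece counter and its look-ahead/look-behind checks with direct enumeration of every length-4 window per row, counting the literal XX_X and X_XX patterns.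
import Mathlib
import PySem

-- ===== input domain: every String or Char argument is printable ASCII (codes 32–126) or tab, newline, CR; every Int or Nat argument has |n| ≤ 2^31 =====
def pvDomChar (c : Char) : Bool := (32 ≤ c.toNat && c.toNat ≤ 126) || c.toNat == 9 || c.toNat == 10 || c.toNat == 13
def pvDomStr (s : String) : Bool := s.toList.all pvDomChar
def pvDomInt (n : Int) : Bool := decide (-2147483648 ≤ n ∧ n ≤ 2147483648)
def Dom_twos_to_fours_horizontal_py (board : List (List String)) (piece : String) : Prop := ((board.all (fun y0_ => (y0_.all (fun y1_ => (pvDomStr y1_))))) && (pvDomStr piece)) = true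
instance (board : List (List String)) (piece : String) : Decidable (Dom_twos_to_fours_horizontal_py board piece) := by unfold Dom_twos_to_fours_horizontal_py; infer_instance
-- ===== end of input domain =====

-- B replaces A's running consecutive-piece counter by direct enumeration of all length-4 windows
-- per row, counting the XX_X and X_XX patterns (objective: simpler; equal value on all inputs A accepts).

-- ===== PORT A =====
-- cell access board[row][col]; under Pre_ every access is in range, so pyGetD's default is never used
def pvCell (row : List String) (i : Int) : String := PySem.List.pyGetD row i ""

def twos_to_fours_horizontal_py (board : List (List String)) (piece : String) : Int :=
  (PySem.List.pyRange 0 (board.length : Int) 1).foldl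
    (fun score rowIdx =>
      let rowL := PySem.List.pyGetD board rowIdx []
      let W : Int := ((PySem.List.pyGetD board 0 []).length : Int)
      ((PySem.List.pyRange 0 W 1).foldl
        (fun (st : Int × Int) col =>
          if pvCell rowL col = piece then
            let pc := st.1 + 1
            if 2 ≤ pc then
              let s1 := if col + 2 < W ∧ pvCell rowL (col + 1) = "" ∧ pvCell rowL (col + 2) = piece then st.2 + 1 else st.2
              let s2 := if 0 ≤ col - 3 ∧ pvCell rowL (col - 2) = "" ∧ pvCell rowL (col - 3) = piece then s1 + 1 else s1
              (pc, s2)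
            else (pc, st.2)
          else (0, st.2))
        ((0 : Int), score)).2)
    0

-- ===== PORT B =====
def twos_to_fours_horizontal_py_alt (board : List (List String)) (piece : String) : Int :=
  board.foldl
    (fun score row =>
      let W : Int := ((PySem.List.pyGetD board 0 []).length : Int)
      (PySem.List.pyRange 0 (W - 3) 1).foldl
        (fun sc col =>
          let w := (pvCell row col, pvCell row (col + 1), pvCell row (col + 2), pvCell row (col + 3))
          let sc := if w = (piece, piece, "", piece) then sc + 1 else sc
          if w = (piece, "", piece, piece) then sc + 1 else sc)
        score)
    0

-- ===== PRECONDITION & SPEC =====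
-- Pre_ excludes exactly the ragged boards on which Python A raises IndexError: a row shorter than row 0.
def Pre_twos_to_fours_horizontal_py (board : List (List String)) (piece : String) : Prop :=
  ∀ r ∈ board, (board.headD []).length ≤ r.length
instance (board : List (List String)) (piece : String) : Decidable (Pre_twos_to_fours_horizontal_py board piece) := by unfold Pre_twos_to_fours_horizontal_py; infer_instance

def pvWitness_twos_to_fours_horizontal_py : List (List String) × String :=
  ([["X", "X", "", "X"], ["O", "", "", ""]], "X")

def Spec_twos_to_fours_horizontal_py (board : List (List String)) (piece : String) (out : Int) : Prop := out = twos_to_fours_horizontal_py_alt board piece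
instance (board : List (List String)) (piece : String) (out : Int) : Decidable (Spec_twos_to_fours_horizontal_py board piece out) := by unfold Spec_twos_to_fours_horizontal_py; infer_instance

-- ===== CLAIM (what is proved, stated in full; the proofs are below) =====
def Claim_equal_twos_to_fours_horizontal_py : Prop := ∀ (board : List (List String)) (piece : String), Dom_twos_to_fours_horizontal_py board piece → Pre_twos_to_fours_horizontal_py board piece → Spec_twos_to_fours_horizontal_py board piece (twos_to_fours_horizontal_py board piece)

-- ===== LEMMAS AND PROOFS =====

-- window patterns XX_X and X_XX starting at column s
def pvWin1 (row : List String) (piece : String) (s : Nat) : Bool :=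
  (row.getD s "" == piece) && (row.getD (s+1) "" == piece) && (row.getD (s+2) "" == "") && (row.getD (s+3) "" == piece)

def pvWin2 (row : List String) (piece : String) (s : Nat) : Bool :=
  (row.getD s "" == piece) && (row.getD (s+1) "" == "") && (row.getD (s+2) "" == piece) && (row.getD (s+3) "" == piece)

-- the conditions under which A's two score increments fire at column n
def pvP1 (row : List String) (piece : String) (W n : Nat) : Bool :=
  decide (1 ≤ n) && decide (n + 2 < W) && pvWin1 row piece (n-1)

def pvP2 (row : List String) (piece : String) (n : Nat) : Bool :=
  decide (3 ≤ n) && pvWin2 row piece (n-3)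

-- B's per-row total
def pvRowScore (row : List String) (piece : String) (W : Nat) : Int :=
  ∑ s ∈ Finset.range (W - 3), ((if pvWin1 row piece s then (1:Int) else 0) + (if pvWin2 row piece s then (1:Int) else 0))

-- A's piece_count after processing columns 0..c-1
def pvPc (row : List String) (piece : String) : Nat → Int
  | 0 => 0
  | n+1 => if row.getD n "" = piece then pvPc row piece n + 1 else 0

-- A's inner-loop step, on Nat column indices
def pvStep (row : List String) (piece : String) (W : Nat) (st : Int × Int) (n : Nat) : Int × Int :=
  if row.getD n "" = piece then
    if 2 ≤ st.1 + 1 then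
      let s1 := if n + 2 < W ∧ row.getD (n+1) "" = "" ∧ row.getD (n+2) "" = piece then st.2 + 1 else st.2
      let s2 := if 3 ≤ n ∧ row.getD (n-2) "" = "" ∧ row.getD (n-3) "" = piece then s1 + 1 else s1
      (st.1 + 1, s2)
    else (st.1 + 1, st.2)
  else (0, st.2)

lemma pvPc_nonneg (row : List String) (piece : String) : ∀ c, 0 ≤ pvPc row piece c := by
  intro c; induction c with
  | zero => simp [pvPc]
  | succ n ih => simp only [pvPc]; split <;> omega

lemma pvPc_one_le (row : List String) (piece : String) :
    ∀ c, (1 ≤ pvPc row piece c) ↔ (1 ≤ c ∧ row.getD (c-1) "" = piece) := by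
  intro c
  cases c with
  | zero => simp [pvPc]
  | succ n =>
    have hn := pvPc_nonneg row piece n
    by_cases h1 : row.getD n "" = piece
    · simp only [pvPc, if_pos h1, Nat.add_sub_cancel]
      exact ⟨fun _ => ⟨by omega, h1⟩, fun _ => by omega⟩
    · simp only [pvPc, if_neg h1, Nat.add_sub_cancel]
      exact ⟨fun h => absurd h (by omega), fun h => absurd h.2 h1⟩

lemma pvStep_cast (row : List String) (piece : String) (W : Nat) (st : Int × Int) (n : Nat) :
    (fun (st : Int × Int) (col : Int) =>
      if pvCell row col = piece then
        let pc := st.1 + 1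
        if 2 ≤ pc then
          let s1 := if col + 2 < (W:Int) ∧ pvCell row (col + 1) = "" ∧ pvCell row (col + 2) = piece then st.2 + 1 else st.2
          let s2 := if 0 ≤ col - 3 ∧ pvCell row (col - 2) = "" ∧ pvCell row (col - 3) = piece then s1 + 1 else s1
          (pc, s2)
        else (pc, st.2)
      else (0, st.2)) st ((0:Int) + (n:Nat)) = pvStep row piece W st n := by
  have e0 : (0:Int) + (n:Nat) = ((n:Nat):Int) := by omega
  have e1 : ((n:Nat):Int) + 1 = ((n+1 : Nat):Int) := by omega
  have e2 : ((n:Nat):Int) + 2 = ((n+2 : Nat):Int) := by omega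
  have g1 : (((n:Nat):Int) + 2 < (W:Int)) ↔ (n+2 < W) := by omega
  have g2 : (0 ≤ ((n:Nat):Int) - 3) ↔ (3 ≤ n) := by omega
  by_cases h3 : 3 ≤ n
  · have em2 : ((n:Nat):Int) - 2 = ((n-2 : Nat):Int) := by omega
    have em3 : ((n:Nat):Int) - 3 = ((n-3 : Nat):Int) := by omega
    simp only [pvStep, e0, e1, e2, em2, em3, pvCell, PySem.List.pyGetD_natCast,
      Nat.cast_lt, eq_true h3, eq_true (Int.natCast_nonneg (n - 3 : Nat)), true_and]
  · have g2' : ¬ (0 ≤ ((n:Nat):Int) - 3) := by omega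
    simp only [pvStep, e0, e1, e2, pvCell, PySem.List.pyGetD_natCast, Nat.cast_lt,
      eq_false g2', eq_false h3, false_and, if_false]

lemma pvStep_spec (row : List String) (piece : String) (W : Nat) (c : Nat) (S : Int) :
    pvStep row piece W (pvPc row piece c, S) c
      = (pvPc row piece (c+1),
         S + ((if pvP1 row piece W c then (1:Int) else 0) + (if pvP2 row piece c then (1:Int) else 0))) := by
  have hn := pvPc_nonneg row piece c
  have hiff := pvPc_one_le row piece c
  by_cases hc : row.getD c "" = piece
  · by_cases h2 : 1 ≤ pvPc row piece c
    · obtain ⟨hc1, hprev⟩ := hiff.1 h2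
      have cond1 : (pvP1 row piece W c = true) ↔ (c + 2 < W ∧ row.getD (c+1) "" = "" ∧ row.getD (c+2) "" = piece) := by
        unfold pvP1 pvWin1
        simp only [ne_eq, show c - 1 + 1 = c by omega, show c - 1 + 2 = c + 1 by omega,
          show c - 1 + 3 = c + 2 by omega, Bool.and_eq_true, decide_eq_true_eq, beq_iff_eq]
        tauto
      have cond2 : (pvP2 row piece c = true) ↔ (3 ≤ c ∧ row.getD (c-2) "" = "" ∧ row.getD (c-3) "" = piece) := by
        unfold pvP2 pvWin2
        by_cases h3 : 3 ≤ c
        · simp only [ne_eq, show c - 3 + 1 = c - 2 by omega, show c - 3 + 2 = c - 1 by omega,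
            show c - 3 + 3 = c by omega, Bool.and_eq_true, decide_eq_true_eq, beq_iff_eq]
          tauto
        · simp [h3]
      have hpcs : pvPc row piece (c+1) = pvPc row piece c + 1 := by
        simp only [pvPc, if_pos hc]
      rw [pvStep]
      simp only [if_pos hc, if_pos (show (2:Int) ≤ pvPc row piece c + 1 by omega), cond1, cond2, hpcs]
      split_ifs <;> simp only [Prod.mk.injEq, true_and] <;> omega
    · have np : ¬ (1 ≤ c ∧ row.getD (c-1) "" = piece) := fun h => h2 (hiff.2 h)
      have c1f : pvP1 row piece W c = false := by
        rw [Bool.eq_false_iff]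
        unfold pvP1 pvWin1
        simp only [ne_eq, Bool.and_eq_true, decide_eq_true_eq, beq_iff_eq]
        tauto
      have c2f : pvP2 row piece c = false := by
        rw [Bool.eq_false_iff]
        unfold pvP2 pvWin2
        by_cases h3 : 3 ≤ c
        · have hne : row.getD (c-1) "" ≠ piece := fun hp => np ⟨by omega, hp⟩
          simp only [ne_eq, show c - 3 + 2 = c - 1 by omega, Bool.and_eq_true, decide_eq_true_eq, beq_iff_eq]
          tauto
        · simp [h3]
      have hpcs : pvPc row piece (c+1) = pvPc row piece c + 1 := by
        simp only [pvPc, if_pos hc]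
      rw [pvStep]
      simp only [if_pos hc, if_neg (show ¬ (2:Int) ≤ pvPc row piece c + 1 by omega), c1f, c2f,
        Bool.false_eq_true, if_false, hpcs, add_zero]
  · have c1f : pvP1 row piece W c = false := by
      rw [Bool.eq_false_iff]
      unfold pvP1 pvWin1
      by_cases h1 : 1 ≤ c
      · simp only [ne_eq, show c - 1 + 1 = c by omega, Bool.and_eq_true, decide_eq_true_eq, beq_iff_eq]
        tauto
      · simp [h1]
    have c2f : pvP2 row piece c = false := by
      rw [Bool.eq_false_iff]
      unfold pvP2 pvWin2
      by_cases h3 : 3 ≤ c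
      · simp only [ne_eq, show c - 3 + 3 = c by omega, Bool.and_eq_true, decide_eq_true_eq, beq_iff_eq]
        tauto
      · simp [h3]
    have hpcs : pvPc row piece (c+1) = 0 := by
      simp only [pvPc, if_neg hc]
    rw [pvStep]
    simp only [if_neg hc, c1f, c2f, Bool.false_eq_true, if_false, hpcs, add_zero]

lemma pvFoldA (row : List String) (piece : String) (W : Nat) (S : Int) :
    ∀ c, (List.range c).foldl (pvStep row piece W) ((0:Int), S)
      = (pvPc row piece c,
         S + ∑ n ∈ Finset.range c, ((if pvP1 row piece W n then (1:Int) else 0) + (if pvP2 row piece n then (1:Int) else 0))) := by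
  intro c
  induction c with
  | zero => simp [pvPc]
  | succ c ih =>
    rw [List.range_succ, List.foldl_append, ih, List.foldl_cons, List.foldl_nil,
      pvStep_spec, Finset.sum_range_succ]
    ring_nf

lemma pvShift1 (row : List String) (piece : String) (W : Nat) :
    ∑ n ∈ Finset.range W, (if pvP1 row piece W n then (1:Int) else 0)
      = ∑ s ∈ Finset.range (W - 3), (if pvWin1 row piece s then (1:Int) else 0) := by
  have h1 : ∀ n, (if pvP1 row piece W n then (1:Int) else 0)
      = if n ∈ Finset.Ico 1 (W-2) then (if pvWin1 row piece (n-1) then (1:Int) else 0) else 0 := by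
    intro n
    unfold pvP1
    by_cases ha : 1 ≤ n
    · by_cases hb : n + 2 < W
      · have hm : n ∈ Finset.Ico 1 (W-2) := by rw [Finset.mem_Ico]; omega
        cases hw : pvWin1 row piece (n-1) <;> simp [ha, hb, hw, hm]
      · have hm : n ∉ Finset.Ico 1 (W-2) := by rw [Finset.mem_Ico]; omega
        simp [hb, hm]
    · have hm : n ∉ Finset.Ico 1 (W-2) := by rw [Finset.mem_Ico]; omega
      simp [ha, hm]
  simp only [h1]
  rw [Finset.sum_ite_mem, Finset.range_eq_Ico, Finset.Ico_inter_Ico,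
    show max 0 1 = 1 by omega, show min W (W-2) = W-2 by omega,
    Finset.sum_Ico_eq_sum_range, show W - 2 - 1 = W - 3 by omega]
  simp [Nat.add_sub_cancel_left]

lemma pvShift2 (row : List String) (piece : String) (W : Nat) :
    ∑ n ∈ Finset.range W, (if pvP2 row piece n then (1:Int) else 0)
      = ∑ s ∈ Finset.range (W - 3), (if pvWin2 row piece s then (1:Int) else 0) := by
  have h1 : ∀ n, n < W → (if pvP2 row piece n then (1:Int) else 0)
      = if n ∈ Finset.Ico 3 W then (if pvWin2 row piece (n-3) then (1:Int) else 0) else 0 := by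
    intro n hb
    unfold pvP2
    by_cases ha : 3 ≤ n
    · have hm : n ∈ Finset.Ico 3 W := by rw [Finset.mem_Ico]; omega
      cases hw : pvWin2 row piece (n-3) <;> simp [ha, hw, hm]
    · have hm : n ∉ Finset.Ico 3 W := by rw [Finset.mem_Ico]; omega
      simp [ha, hm]
  rw [Finset.sum_congr rfl (fun n hn => h1 n (Finset.mem_range.mp hn)),
    Finset.sum_ite_mem, Finset.range_eq_Ico, Finset.Ico_inter_Ico,
    show max 0 3 = 3 by omega, show min W W = W by omega,
    Finset.sum_Ico_eq_sum_range]
  simp [Nat.add_sub_cancel_left]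

lemma pvRowA (row : List String) (piece : String) (W : Nat) (sc : Int) :
    ((PySem.List.pyRange 0 (W:Int) 1).foldl
        (fun (st : Int × Int) col =>
          if pvCell row col = piece then
            let pc := st.1 + 1
            if 2 ≤ pc then
              let s1 := if col + 2 < (W:Int) ∧ pvCell row (col + 1) = "" ∧ pvCell row (col + 2) = piece then st.2 + 1 else st.2
              let s2 := if 0 ≤ col - 3 ∧ pvCell row (col - 2) = "" ∧ pvCell row (col - 3) = piece then s1 + 1 else s1
              (pc, s2)
            else (pc, st.2)
          else (0, st.2))
        ((0 : Int), sc)).2 = sc + pvRowScore row piece W := by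
  rw [PySem.List.pyRange_one, show ((W:Int) - 0).toNat = W by omega, List.foldl_map]
  have hstep : (fun (st : Int × Int) (k : Nat) =>
      (if pvCell row ((0:Int) + k) = piece then
        let pc := st.1 + 1
        if 2 ≤ pc then
          let s1 := if (0:Int) + k + 2 < (W:Int) ∧ pvCell row ((0:Int) + k + 1) = "" ∧ pvCell row ((0:Int) + k + 2) = piece then st.2 + 1 else st.2
          let s2 := if 0 ≤ (0:Int) + k - 3 ∧ pvCell row ((0:Int) + k - 2) = "" ∧ pvCell row ((0:Int) + k - 3) = piece then s1 + 1 else s1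
          (pc, s2)
        else (pc, st.2)
      else (0, st.2))) = pvStep row piece W := by
    funext st k
    exact pvStep_cast row piece W st k
  rw [hstep, pvFoldA]
  unfold pvRowScore
  rw [Finset.sum_add_distrib, Finset.sum_add_distrib, pvShift1, pvShift2]

lemma pvRowB (row : List String) (piece : String) (W : Nat) (sc : Int) :
    (PySem.List.pyRange 0 ((W:Int) - 3) 1).foldl
        (fun sc col =>
          let w := (pvCell row col, pvCell row (col + 1), pvCell row (col + 2), pvCell row (col + 3))
          let sc := if w = (piece, piece, "", piece) then sc + 1 else sc
          if w = (piece, "", piece, piece) then sc + 1 else sc)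
        sc = sc + pvRowScore row piece W := by
  rw [PySem.List.pyRange_one, show ((W:Int) - 3 - 0).toNat = W - 3 by omega, List.foldl_map]
  unfold pvRowScore
  induction (W - 3) with
  | zero => simp
  | succ c ih =>
    rw [List.range_succ, List.foldl_append, ih, List.foldl_cons, List.foldl_nil,
      Finset.sum_range_succ]
    have e0 : (0:Int) + (c:Nat) = ((c:Nat):Int) := by omega
    have e1 : ((c:Nat):Int) + 1 = ((c+1 : Nat):Int) := by omega
    have e2 : ((c:Nat):Int) + 2 = ((c+2 : Nat):Int) := by omega
    have e3 : ((c:Nat):Int) + 3 = ((c+3 : Nat):Int) := by omega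
    have hw1 : ((row.getD c "" = piece ∧ row.getD (c+1) "" = piece ∧ row.getD (c+2) "" = "" ∧ row.getD (c+3) "" = piece)) ↔ pvWin1 row piece c = true := by
      unfold pvWin1
      simp only [Bool.and_eq_true, beq_iff_eq]
      tauto
    have hw2 : ((row.getD c "" = piece ∧ row.getD (c+1) "" = "" ∧ row.getD (c+2) "" = piece ∧ row.getD (c+3) "" = piece)) ↔ pvWin2 row piece c = true := by
      unfold pvWin2
      simp only [Bool.and_eq_true, beq_iff_eq]
      tauto
    simp only [e0, e1, e2, e3, pvCell, PySem.List.pyGetD_natCast, Prod.mk.injEq, hw1, hw2]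
    cases h1 : pvWin1 row piece c <;> cases h2 : pvWin2 row piece c <;>
      simp [h1, h2] <;> ring

-- ===== VERDICT (by name: the statement is the Claim_ definition above) =====
theorem twos_to_fours_horizontal_py_spec : Claim_equal_twos_to_fours_horizontal_py := by
  intro board piece _hdom _hpre
  unfold Spec_twos_to_fours_horizontal_py twos_to_fours_horizontal_py twos_to_fours_horizontal_py_alt
  refine Eq.trans
    (PySem.List.foldl_pyRange_zero_pyGetD' board ([] : List String)
      (fun score rowL =>
        ((PySem.List.pyRange 0 (((PySem.List.pyGetD board 0 ([] : List String)).length : Int)) 1).foldl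
          (fun (st : Int × Int) col =>
            if pvCell rowL col = piece then
              let pc := st.1 + 1
              if 2 ≤ pc then
                let s1 := if col + 2 < (((PySem.List.pyGetD board 0 ([] : List String)).length : Int)) ∧ pvCell rowL (col + 1) = "" ∧ pvCell rowL (col + 2) = piece then st.2 + 1 else st.2
                let s2 := if 0 ≤ col - 3 ∧ pvCell rowL (col - 2) = "" ∧ pvCell rowL (col - 3) = piece then s1 + 1 else s1
                (pc, s2)
              else (pc, st.2)
            else (0, st.2))
          ((0 : Int), score)).2) 0)
    (PySem.List.foldl_congr_mem _ _ _ _ ?_)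
  intro acc row _hr
  exact Eq.trans
    (pvRowA row piece ((PySem.List.pyGetD board 0 ([] : List String)).length) acc)
    (pvRowB row piece ((PySem.List.pyGetD board 0 ([] : List String)).length) acc).symm
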